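-- pv_equiv track=rewrite | github.com/DaDudek/Uwr | Python/lista3/Zadanie2/Zadanie2Lepiej.py | znajdz_liczby_szczesliwe
-- ===== SOURCE A (Python) =====
-- import math
--
-- def sprawdz_czy_liczba_pierwsza(liczba):
--     pierwiastek = int(math.sqrt(liczba) + 1)
--     for j in range(2, pierwiastek):
--         if (liczba % j == 0):
--             return False
--     return True
--
-- def znajdz_liczby_szczesliwe(ile_cyfr,ilosc_siodemek):
--     lista=[]
--     roznica=ile_cyfr-ilosc_siodemek
--     for i in range(10**(roznica-1),(10**roznica)):
--         napis=str(i)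
--         for j in range(roznica+1):
--             if(sprawdz_czy_liczba_pierwsza(int(napis[:j]+"7"*ilosc_siodemek+napis[j:]))):
--                 x=int(napis[:j]+"7"*ilosc_siodemek+napis[j:])
--                 lista.append(x)
--             y=int("7"*ilosc_siodemek+"0"+napis[:-1])
--             if(sprawdz_czy_liczba_pierwsza(y)):
--                 lista.append(y)
--     return len(set(lista))
-- ===== SOURCE B (Python) =====
-- import math
--
-- def sprawdz_czy_liczba_pierwsza(liczba):
--     return all(liczba % d != 0 for d in range(2, int(math.sqrt(liczba) + 1)))
--
-- def znajdz_liczby_szczesliwe(ile_cyfr, ilosc_siodemek):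
--     # Generate the whole candidate list up front by comprehension (j-outer, the
--     # y-value once per i instead of once per (i, j), no primality testing while
--     # generating), then sort and count primes in one deduplicating scan.
--     roznica = ile_cyfr - ilosc_siodemek
--     siodemki = "7" * ilosc_siodemek
--     kandydaci = [int(str(i)[:j] + siodemki + str(i)[j:])
--                  for j in range(roznica + 1)
--                  for i in range(10**(roznica-1), 10**roznica)]
--     kandydaci += [int(siodemki + "0" + str(i)[:-1])
--                   for i in range(10**(roznica-1), 10**roznica)]
--     kandydaci.sort()
--     wynik = 0
--     poprzedni = None
--     for x in kandydaci:
--         if x != poprzedni: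
--             poprzedni = x
--             if sprawdz_czy_liczba_pierwsza(x):
--                 wynik += 1
--     return wynik
-- ===== Notes on version B (the rewrite author's own statement) =====
-- stated objective: alternative
-- what changed: A tests primality while generating (re-testing the j-independent y roznica+1 times per i) and deduplicates the collected primes at the end; B generates the plain candidate list up front by comprehension (j-outer, y once per i, no primality tests), sorts it, and counts primes in a single deduplicating scan of the sorted list, with the trial-division helper rewritten as an all() over the divisor range.
import Mathlib
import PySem

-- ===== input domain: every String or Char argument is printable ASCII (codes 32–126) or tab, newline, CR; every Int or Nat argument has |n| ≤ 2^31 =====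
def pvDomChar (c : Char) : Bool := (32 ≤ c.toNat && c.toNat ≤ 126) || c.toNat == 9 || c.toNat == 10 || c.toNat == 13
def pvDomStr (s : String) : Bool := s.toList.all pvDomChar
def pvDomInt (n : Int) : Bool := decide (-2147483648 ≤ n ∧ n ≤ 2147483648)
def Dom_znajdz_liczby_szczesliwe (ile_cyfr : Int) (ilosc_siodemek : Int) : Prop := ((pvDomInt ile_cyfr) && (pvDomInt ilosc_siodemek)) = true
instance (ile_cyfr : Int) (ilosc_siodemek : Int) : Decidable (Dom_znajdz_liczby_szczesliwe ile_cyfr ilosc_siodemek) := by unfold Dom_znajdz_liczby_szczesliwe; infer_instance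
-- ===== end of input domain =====

-- B generates the plain candidate list first (j-outer passes, y appended once per i instead of
-- once per (i,j)), sorts it, and counts primes in one deduplicating scan; A tests primality
-- while generating and deduplicates the collected primes at the end.


-- Exact model of the IEEE-754 double arithmetic in 'int(math.sqrt(liczba) + 1)' (both Pythons
-- contain this identical expression): float(liczba) rounds to 53 significant bits half-to-even,
-- math.sqrt is the correctly rounded square root, '+ 1' rounds again, int() truncates.
-- Reformulated over integers (shifts); exact for every 0 ≤ liczba below the double overflow
-- threshold (~1.8e308) — Pre_ keeps every candidate under 10^308, and liczba is never negative.

-- round m / 2^t to the nearest integer, half to even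
def pvRShiftRound (m t : Nat) : Nat :=
  if t = 0 then m else
    let q := m >>> t
    let r := m % (1 <<< t)
    let half := 1 <<< (t - 1)
    if half < r ∨ (r = half ∧ q % 2 = 1) then q + 1 else q

-- exact integer value of float(n) for n ≥ 1 (exponent is ≥ 0 there, so the value is an integer)
def pvFloatInt (n : Nat) : Nat :=
  let L := PySem.Int.bitLength (n : Int)
  if L ≤ 53 then n else pvRShiftRound n (L - 53) <<< (L - 53)

-- nearest integer to √N (√N is never a half-integer, so no tie)
def pvNearestSqrt (N : Nat) : Nat :=
  let s := Nat.sqrt N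
  if s < N - s * s then s + 1 else s

-- pierwiastek = int(math.sqrt(liczba) + 1): the correctly rounded double sqrt of float(liczba)
-- is s·2^(En-52) with s the nearest integer to the sqrt scaled into [2^52, 2^53); '+ 1' is then
-- rounded to 53 bits again and truncated
def pvSqrtBound (liczba : Int) : Int :=
  if liczba ≤ 0 then 1 else
    let v := pvFloatInt liczba.toNat
    let Lv := PySem.Int.bitLength (v : Int)
    let En := (Lv - 1) / 2
    let N := if Lv ≤ 105 then v <<< (104 - 2 * En) else v >>> (2 * En - 104)
    let s := pvNearestSqrt N
    if 52 ≤ En then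
      let m := (s <<< (En - 52)) + 1
      let L1 := PySem.Int.bitLength (m : Int)
      if L1 ≤ 53 then (m : Int) else ((pvRShiftRound m (L1 - 53) <<< (L1 - 53) : Nat) : Int)
    else
      let t := 52 - En
      let M := s + (1 <<< t)
      let fl := M >>> t
      let E1 := PySem.Int.bitLength (fl : Int) - 1
      if E1 ≤ En then (fl : Int)
      else
        let q := pvRShiftRound M (E1 - En)
        if 52 ≤ E1 then ((q <<< (E1 - 52) : Nat) : Int) else ((q >>> (52 - E1) : Nat) : Int)

-- ===== PORT A =====
-- 'for j in range(2, pierwiastek): if liczba % j == 0: return False' as a counter loop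
def pvPetlaA (liczba : Int) (pierwiastek : Int) (j : Int) : Bool :=
  if _h : j < pierwiastek then
    if PySem.Int.mod liczba j == 0 then false else pvPetlaA liczba pierwiastek (j + 1)
  else true
termination_by (pierwiastek - j).toNat
decreasing_by omega

def sprawdz_czy_liczba_pierwsza (liczba : Int) : Bool :=
  let pierwiastek := pvSqrtBound liczba
  pvPetlaA liczba pierwiastek 2

def znajdz_liczby_szczesliwe (ile_cyfr : Int) (ilosc_siodemek : Int) : Int :=
  let roznica := ile_cyfr - ilosc_siodemek
  -- range(10**(roznica-1), 10**roznica): Pre_ has 1 ≤ roznica (otherwise 10**negative is a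
  -- Python float and range raises TypeError), so the .toNat exponents are exact
  let lista : List Int :=
    (PySem.List.pyRange ((10:Int) ^ (roznica - 1).toNat) ((10:Int) ^ roznica.toNat) 1).foldl
      (fun lista i =>
        let napis := PySem.Int.toChars i
        (PySem.List.pyRange 0 (roznica + 1) 1).foldl
          (fun lista j =>
            -- int(napis[:j] + "7"*ilosc_siodemek + napis[j:]); ofChars? is always `some` on
            -- this nonempty digit string, so the .getD 0 default is never taken
            let x := (PySem.Int.ofChars? (PySem.List.slice napis none (some j) ++
                       PySem.List.pyRepeat ['7'] ilosc_siodemek ++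
                       PySem.List.slice napis (some j) none)).getD 0
            let lista := if sprawdz_czy_liczba_pierwsza x then lista ++ [x] else lista
            -- y = int("7"*ilosc_siodemek + "0" + napis[:-1])
            let y := (PySem.Int.ofChars? (PySem.List.pyRepeat ['7'] ilosc_siodemek ++
                       ['0'] ++ PySem.List.slice napis none (some (-1)))).getD 0
            if sprawdz_czy_liczba_pierwsza y then lista ++ [y] else lista)
          lista)
      []
  ((PySem.Set.ofList lista).length : Int)

-- ===== PORT B =====
-- Source B's helper: 'return all(liczba % d != 0 for d in range(2, int(math.sqrt(liczba) + 1)))'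
def sprawdz_czy_liczba_pierwsza_alt (liczba : Int) : Bool :=
  (PySem.List.pyRange 2 (pvSqrtBound liczba) 1).all (fun d => !(PySem.Int.mod liczba d == 0))

def znajdz_liczby_szczesliwe_alt (ile_cyfr : Int) (ilosc_siodemek : Int) : Int :=
  let roznica := ile_cyfr - ilosc_siodemek
  let siodemki := PySem.List.pyRepeat ['7'] ilosc_siodemek   -- "7" * ilosc_siodemek
  -- [int(str(i)[:j] + siodemki + str(i)[j:]) for j in range(roznica+1) for i in range(...)]
  let kandydaci : List Int :=
    (PySem.List.pyRange 0 (roznica + 1) 1).flatMap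
      (fun j =>
        (PySem.List.pyRange ((10:Int) ^ (roznica - 1).toNat) ((10:Int) ^ roznica.toNat) 1).map
          (fun i =>
            let napis := PySem.Int.toChars i
            (PySem.Int.ofChars? (PySem.List.slice napis none (some j) ++ siodemki ++
              PySem.List.slice napis (some j) none)).getD 0))
  -- += [int(siodemki + "0" + str(i)[:-1]) for i in range(...)]
  let kandydaci : List Int :=
    kandydaci ++
      (PySem.List.pyRange ((10:Int) ^ (roznica - 1).toNat) ((10:Int) ^ roznica.toNat) 1).map
        (fun i =>
          (PySem.Int.ofChars? (siodemki ++ ['0'] ++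
            PySem.List.slice (PySem.Int.toChars i) none (some (-1)))).getD 0)
  -- kandydaci.sort(): Python's in-place stable sort, ported as mergeSort
  let kandydaci := kandydaci.mergeSort (fun a b => decide (a ≤ b))
  -- wynik = 0; poprzedni = None; for x: if x != poprzedni: poprzedni = x; if prime: wynik += 1
  (kandydaci.foldl
    (fun st x =>
      if some x ≠ st.2 then
        (if sprawdz_czy_liczba_pierwsza_alt x then st.1 + 1 else st.1, some x)
      else st)
    ((0 : Int), (none : Option Int))).1

-- ===== PRECONDITION & SPEC =====
-- Pre_ excludes exactly the inputs where A raises (B raises there too): roznica ≤ 0 makes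
-- 10**(roznica-1) a float, so range() raises TypeError; and if ile_cyfr ≥ 309 or
-- roznica ≥ 309 some generated candidate exceeds the largest double and math.sqrt raises
-- OverflowError. On every input A returns (within Dom), Pre_ holds.
def Pre_znajdz_liczby_szczesliwe (ile_cyfr : Int) (ilosc_siodemek : Int) : Prop :=
  1 ≤ ile_cyfr - ilosc_siodemek ∧ ile_cyfr ≤ 308 ∧ ile_cyfr - ilosc_siodemek ≤ 308
instance (ile_cyfr : Int) (ilosc_siodemek : Int) : Decidable (Pre_znajdz_liczby_szczesliwe ile_cyfr ilosc_siodemek) := by unfold Pre_znajdz_liczby_szczesliwe; infer_instance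
def pvWitness_znajdz_liczby_szczesliwe : Int × Int := (3, 1)

def Spec_znajdz_liczby_szczesliwe (ile_cyfr : Int) (ilosc_siodemek : Int) (out : Int) : Prop := out = znajdz_liczby_szczesliwe_alt ile_cyfr ilosc_siodemek
instance (ile_cyfr : Int) (ilosc_siodemek : Int) (out : Int) : Decidable (Spec_znajdz_liczby_szczesliwe ile_cyfr ilosc_siodemek out) := by unfold Spec_znajdz_liczby_szczesliwe; infer_instance

-- ===== CLAIM (what is proved, stated in full; the proofs are below) =====
def Claim_equal_znajdz_liczby_szczesliwe : Prop := ∀ (ile_cyfr : Int) (ilosc_siodemek : Int), Dom_znajdz_liczby_szczesliwe ile_cyfr ilosc_siodemek → Pre_znajdz_liczby_szczesliwe ile_cyfr ilosc_siodemek → Spec_znajdz_liczby_szczesliwe ile_cyfr ilosc_siodemek (znajdz_liczby_szczesliwe ile_cyfr ilosc_siodemek)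

-- ===== LEMMAS AND PROOFS =====

-- the seven-insertion value int(napis[:j] + "7"*k + napis[j:])
def pvIns (k : Int) (napis : List Char) (j : Int) : Int :=
  (PySem.Int.ofChars? (PySem.List.slice napis none (some j) ++
    PySem.List.pyRepeat ['7'] k ++ PySem.List.slice napis (some j) none)).getD 0

-- the value y = int("7"*k + "0" + napis[:-1])
def pvY (k : Int) (napis : List Char) : Int :=
  (PySem.Int.ofChars? (PySem.List.pyRepeat ['7'] k ++ ['0'] ++
    PySem.List.slice napis none (some (-1)))).getD 0

def pvJs (r : Int) : List Int := PySem.List.pyRange 0 (r + 1) 1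
def pvIs (r : Int) : List Int := PySem.List.pyRange ((10:Int) ^ (r - 1).toNat) ((10:Int) ^ r.toNat) 1

-- all candidates in A's generation order (with multiplicity)
def pvCandA (k r : Int) : List Int :=
  (pvIs r).flatMap (fun i => (pvJs r).flatMap
    (fun j => [pvIns k (PySem.Int.toChars i) j, pvY k (PySem.Int.toChars i)]))

-- all candidates in B's generation order (j-outer passes, then one y per i)
def pvCandB (k r : Int) : List Int :=
  (pvJs r).flatMap (fun j => (pvIs r).map (fun i => pvIns k (PySem.Int.toChars i) j)) ++
    (pvIs r).map (fun i => pvY k (PySem.Int.toChars i))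

lemma pvA_list (c k : Int) :
    (pvIs (c - k)).foldl (fun lista i =>
      (pvJs (c - k)).foldl (fun lista j =>
        let x := pvIns k (PySem.Int.toChars i) j
        let lista := if sprawdz_czy_liczba_pierwsza x then lista ++ [x] else lista
        if sprawdz_czy_liczba_pierwsza (pvY k (PySem.Int.toChars i)) then
          lista ++ [pvY k (PySem.Int.toChars i)] else lista) lista) [] =
    (pvCandA k (c - k)).filter sprawdz_czy_liczba_pierwsza := by
  have hb : ∀ i, (fun (acc : List Int) (j : Int) =>
        let x := pvIns k (PySem.Int.toChars i) j
        let lista := if sprawdz_czy_liczba_pierwsza x then acc ++ [x] else acc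
        if sprawdz_czy_liczba_pierwsza (pvY k (PySem.Int.toChars i)) then
          lista ++ [pvY k (PySem.Int.toChars i)] else lista) =
      fun acc j => acc ++ ([pvIns k (PySem.Int.toChars i) j,
        pvY k (PySem.Int.toChars i)].filter sprawdz_czy_liczba_pierwsza) := by
    intro i; funext acc j
    simp only [List.filter]
    split_ifs <;> simp_all
  have houter : (fun (acc : List Int) (i : Int) =>
      (pvJs (c - k)).foldl (fun lista j =>
        let x := pvIns k (PySem.Int.toChars i) j
        let lista := if sprawdz_czy_liczba_pierwsza x then lista ++ [x] else lista
        if sprawdz_czy_liczba_pierwsza (pvY k (PySem.Int.toChars i)) then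
          lista ++ [pvY k (PySem.Int.toChars i)] else lista) acc) =
      fun acc i => acc ++ (pvJs (c - k)).flatMap (fun j => [pvIns k (PySem.Int.toChars i) j,
        pvY k (PySem.Int.toChars i)].filter sprawdz_czy_liczba_pierwsza) := by
    funext acc i
    rw [hb i, PySem.List.foldl_append_eq_flatMap]
  rw [houter, PySem.List.foldl_append_eq_flatMap]
  simp [pvCandA, List.filter_flatMap]

lemma pvA_val (c k : Int) :
    znajdz_liczby_szczesliwe c k =
      ((PySem.Set.ofList ((pvCandA k (c - k)).filter sprawdz_czy_liczba_pierwsza)).length : Int) :=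
  congrArg (fun l => ((PySem.Set.ofList l).length : Int)) (pvA_list c k)

-- A's early-return divisor loop is Source B's 'all' over the same range
lemma pv_petla_all (l p j : Int) :
    pvPetlaA l p j = (PySem.List.pyRange j p 1).all (fun d => !(PySem.Int.mod l d == 0)) := by
  fun_induction pvPetlaA l p j with
  | case1 jj h hm =>
    rw [PySem.List.pyRange_one_cons h]
    simp_all
  | case2 jj h hm ih =>
    rw [PySem.List.pyRange_one_cons h]
    simp_all
  | case3 jj h =>
    have : PySem.List.pyRange jj p 1 = [] := by simp [PySem.List.pyRange]; omega
    simp [this]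

lemma pv_sprawdz_eq : sprawdz_czy_liczba_pierwsza_alt = sprawdz_czy_liczba_pierwsza := by
  funext l
  unfold sprawdz_czy_liczba_pierwsza_alt sprawdz_czy_liczba_pierwsza
  exact (pv_petla_all l (pvSqrtBound l) 2).symm

-- adjacent-dedup scan: the values kept by B's 'if x != poprzedni' loop
def pvDedupAdj : Option Int → List Int → List Int
  | _, [] => []
  | prev, x :: t => if some x ≠ prev then x :: pvDedupAdj (some x) t else pvDedupAdj prev t

lemma pv_scan_eq (p : Int → Bool) (l : List Int) :
    ∀ (n : Int) (prev : Option Int),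
      (l.foldl (fun st x =>
        if some x ≠ st.2 then (if p x then st.1 + 1 else st.1, some x) else st)
        (n, prev)).1 = n + ((pvDedupAdj prev l).countP p : Int) := by
  induction l with
  | nil => intro n prev; simp [pvDedupAdj]
  | cons x t ih =>
    intro n prev
    rw [List.foldl_cons, pvDedupAdj]
    by_cases h : some x = prev
    · have h1 : ¬ (some x ≠ (n, prev).2) := by simp [h]
      have h2 : ¬ (some x ≠ prev) := by simp [h]
      rw [if_neg h1, if_neg h2]
      exact ih n prev
    · have h1 : some x ≠ (n, prev).2 := by simpa using h
      rw [if_pos h1, if_pos h, ih, List.countP_cons]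
      split_ifs <;> push_cast <;> omega

lemma pv_dedupAdj_sorted (l : List Int) (hs : l.Pairwise (· ≤ ·)) :
    ∀ (q : Int), (∀ z ∈ l, q ≤ z) →
      (∀ x, x ∈ pvDedupAdj (some q) l ↔ x ∈ l ∧ x ≠ q) ∧ (pvDedupAdj (some q) l).Nodup := by
  induction l with
  | nil => intro q _; simp [pvDedupAdj]
  | cons a t ih =>
    intro q hq
    have hat : ∀ z ∈ t, a ≤ z := (List.pairwise_cons.mp hs).1
    have hts : t.Pairwise (· ≤ ·) := (List.pairwise_cons.mp hs).2
    by_cases hqa : a = q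
    · have : pvDedupAdj (some q) (a :: t) = pvDedupAdj (some q) t := by
        simp [pvDedupAdj, hqa]
      rw [this]
      obtain ⟨hmem, hnd⟩ := ih hts q (by intro z hz; exact hqa ▸ hat z hz)
      refine ⟨fun x => ?_, hnd⟩
      rw [hmem x]
      constructor
      · rintro ⟨hx, hxq⟩; exact ⟨List.mem_cons_of_mem _ hx, hxq⟩
      · rintro ⟨hx, hxq⟩
        rcases List.mem_cons.mp hx with rfl | hx
        · exact absurd hqa hxq
        · exact ⟨hx, hxq⟩
    · have : pvDedupAdj (some q) (a :: t) = a :: pvDedupAdj (some a) t := by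
        simp [pvDedupAdj, hqa]
      rw [this]
      obtain ⟨hmem, hnd⟩ := ih hts a hat
      have hqa' : q < a := lt_of_le_of_ne (hq a (List.mem_cons_self)) (fun h => hqa h.symm)
      constructor
      · intro x
        simp only [List.mem_cons, hmem x]
        constructor
        · rintro (rfl | ⟨hx, hxa⟩)
          · exact ⟨Or.inl rfl, by omega⟩
          · exact ⟨Or.inr hx, by have := hat x hx; omega⟩
        · rintro ⟨rfl | hx, hxq⟩
          · exact Or.inl rfl
          · by_cases hxa : x = a
            · exact Or.inl hxa
            · exact Or.inr ⟨hx, hxa⟩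
      · exact List.nodup_cons.mpr ⟨fun h => ((hmem a).mp h).2 rfl, hnd⟩

lemma pv_dedupAdj_none (l : List Int) (hs : l.Pairwise (· ≤ ·)) :
    (∀ x, x ∈ pvDedupAdj none l ↔ x ∈ l) ∧ (pvDedupAdj none l).Nodup := by
  cases l with
  | nil => simp [pvDedupAdj]
  | cons a t =>
    have hat : ∀ z ∈ t, a ≤ z := (List.pairwise_cons.mp hs).1
    have hts : t.Pairwise (· ≤ ·) := (List.pairwise_cons.mp hs).2
    have : pvDedupAdj none (a :: t) = a :: pvDedupAdj (some a) t := by simp [pvDedupAdj]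
    rw [this]
    obtain ⟨hmem, hnd⟩ := pv_dedupAdj_sorted t hts a hat
    constructor
    · intro x
      simp only [List.mem_cons, hmem x]
      constructor
      · rintro (rfl | ⟨hx, _⟩)
        · exact Or.inl rfl
        · exact Or.inr hx
      · rintro (rfl | hx)
        · exact Or.inl rfl
        · by_cases hxa : x = a
          · exact Or.inl hxa
          · exact Or.inr ⟨hx, hxa⟩
    · exact List.nodup_cons.mpr ⟨fun h => ((hmem a).mp h).2 rfl, hnd⟩

lemma pvB_val (c k : Int) :
    znajdz_liczby_szczesliwe_alt c k =
      (((pvDedupAdj none ((pvCandB k (c - k)).mergeSort (fun a b => decide (a ≤ b)))).countP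
        sprawdz_czy_liczba_pierwsza_alt : Nat) : Int) := by
  show (((pvCandB k (c - k)).mergeSort (fun a b => decide (a ≤ b))).foldl
      (fun st x =>
        if some x ≠ st.2 then
          (if sprawdz_czy_liczba_pierwsza_alt x then st.1 + 1 else st.1, some x)
        else st)
      ((0 : Int), (none : Option Int))).1 = _
  rw [pv_scan_eq]
  simp

lemma pv_mem_cand (c k : Int) (h : 1 ≤ c - k) (x : Int) :
    x ∈ pvCandA k (c - k) ↔ x ∈ pvCandB k (c - k) := by
  have h0 : (0 : Int) ∈ pvJs (c - k) := by
    rw [pvJs, PySem.List.mem_pyRange_one]; omega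
  simp only [pvCandA, pvCandB, List.mem_flatMap, List.mem_append, List.mem_map, List.mem_cons,
    List.not_mem_nil, or_false]
  constructor
  · rintro ⟨i, hi, j, hj, hx | hx⟩
    · exact Or.inl ⟨j, hj, i, hi, hx.symm⟩
    · exact Or.inr ⟨i, hi, hx.symm⟩
  · rintro (⟨j, hj, i, hi, hx⟩ | ⟨i, hi, hx⟩)
    · exact ⟨i, hi, j, hj, Or.inl hx.symm⟩
    · exact ⟨i, hi, 0, h0, Or.inr hx.symm⟩

lemma pv_countP_congr (p : Int → Bool) (l₁ l₂ : List Int) (h₁ : l₁.Nodup) (h₂ : l₂.Nodup)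
    (hmem : ∀ x, x ∈ l₁ ↔ x ∈ l₂) : l₁.countP p = l₂.countP p :=
  ((List.perm_ext_iff_of_nodup h₁ h₂).mpr hmem).countP_eq p

lemma pv_count_eq (p : Int → Bool) (cA : List Int) :
    (PySem.Set.ofList (cA.filter p)).length = (PySem.Set.ofList cA).countP p := by
  rw [List.countP_eq_length_filter]
  apply List.Perm.length_eq
  rw [List.perm_ext_iff_of_nodup (PySem.Set.nodup_ofList _)
    (List.Nodup.filter _ (PySem.Set.nodup_ofList _))]
  intro a
  simp [PySem.Set.mem_ofList, List.mem_filter, and_comm]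

-- ===== VERDICT (by name: the statement is the Claim_ definition above) =====
theorem znajdz_liczby_szczesliwe_spec : Claim_equal_znajdz_liczby_szczesliwe := by
  intro c k _ hpre
  unfold Spec_znajdz_liczby_szczesliwe
  rw [pvA_val, pvB_val, pv_sprawdz_eq, pv_count_eq]
  have hsorted : ((pvCandB k (c - k)).mergeSort (fun a b => decide (a ≤ b))).Pairwise (· ≤ ·) := by
    have := List.pairwise_mergeSort (le := fun (a b : Int) => decide (a ≤ b))
      (fun a b c hab hbc => by simp_all; omega) (fun a b => by simp; omega)
      (pvCandB k (c - k))
    simpa using this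
  obtain ⟨hmem, hnd⟩ := pv_dedupAdj_none _ hsorted
  congr 1
  apply pv_countP_congr _ _ _ (PySem.Set.nodup_ofList _) hnd
  intro x
  rw [PySem.Set.mem_ofList, hmem x, List.mem_mergeSort]
  exact pv_mem_cand c k hpre.1 x
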